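-- pv_equiv track=rewrite | github.com/wschodslonca/sdsz | python/NasaDataConverter/sets/func.py | grabdatabyear
-- ===== SOURCE A (Python) =====
-- def grabdatabyear(listx, year):
--     ant = -1
--     arc = -1
--     glob = -1
--     for i in range(len(listx)):
--         for j in range(len(listx[i])):
--             if listx[i][j][0] == year:
--                 if i == 0:
--                     ant = listx[i][j][1]
--                 elif i == 1:
--                     arc = listx[i][j][1]
--                 elif i == 2:
--                     glob = listx[i][j][1]
--     return ant, arc, glob
-- ===== SOURCE B (Python) =====
-- def _last_value_for_year(entries, year):
--     for entry in reversed(entries):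
--         if entry[0] == year:
--             return entry[1]
--     return -1
--
--
-- def grabdatabyear(listx, year):
--     res = [-1, -1, -1]
--     for i in range(min(3, len(listx))):
--         res[i] = _last_value_for_year(listx[i], year)
--     return res[0], res[1], res[2]
-- ===== Notes on version B (the rewrite author's own statement) =====
-- stated objective: alternative
-- what changed: Replaces the single nested loop with i==0/1/2 branches by three independent reversed-scan last-match lookups (early exit on first hit from the back), ignoring 4th+ sublists without ever visiting them.
import Mathlib
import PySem

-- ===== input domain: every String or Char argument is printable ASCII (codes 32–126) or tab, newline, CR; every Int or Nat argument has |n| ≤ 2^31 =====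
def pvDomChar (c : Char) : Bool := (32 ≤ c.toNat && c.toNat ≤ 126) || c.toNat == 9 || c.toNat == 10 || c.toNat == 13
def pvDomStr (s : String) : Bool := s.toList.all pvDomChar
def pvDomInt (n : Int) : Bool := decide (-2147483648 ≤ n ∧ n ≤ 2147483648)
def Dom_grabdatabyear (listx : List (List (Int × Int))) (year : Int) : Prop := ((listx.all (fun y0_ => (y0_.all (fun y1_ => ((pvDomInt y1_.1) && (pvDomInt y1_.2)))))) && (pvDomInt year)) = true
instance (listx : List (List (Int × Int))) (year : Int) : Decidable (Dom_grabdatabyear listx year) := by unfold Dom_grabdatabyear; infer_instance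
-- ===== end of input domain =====

-- B replaces A's nested loop with branch-on-i by three independent reversed-scan
-- last-match lookups (objective: alternative decomposition, same exact values).

-- ===== PORT A =====
-- one step of A's inner loop for outer index i: update the slot picked by i
def pvAStep (year : Int) (i : Nat) (s : Int × Int × Int) (p : Int × Int) : Int × Int × Int :=
  if p.1 == year then
    if i == 0 then (p.2, s.2.1, s.2.2)
    else if i == 1 then (s.1, p.2, s.2.2)
    else if i == 2 then (s.1, s.2.1, p.2)
    else s
  else s

def grabdatabyear (listx : List (List (Int × Int))) (year : Int) : Int × Int × Int :=
  (List.range listx.length).foldl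
    (fun s i => (listx.getD i []).foldl (pvAStep year i) s)
    (-1, -1, -1)

-- ===== PORT B =====
-- scan, returning the value of the first matching entry (default -1)
def pvScanFirst (year : Int) : List (Int × Int) → Int
  | [] => -1
  | p :: rest => if p.1 == year then p.2 else pvScanFirst year rest

-- value of the LAST entry with [0] == year, by scanning in reverse
def pvLastValueForYear (entries : List (Int × Int)) (year : Int) : Int :=
  pvScanFirst year entries.reverse

def grabdatabyear_alt (listx : List (List (Int × Int))) (year : Int) : Int × Int × Int :=
  ( if 0 < listx.length then pvLastValueForYear (listx.getD 0 []) year else -1,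
    if 1 < listx.length then pvLastValueForYear (listx.getD 1 []) year else -1,
    if 2 < listx.length then pvLastValueForYear (listx.getD 2 []) year else -1 )

-- ===== PRECONDITION & SPEC =====
def Spec_grabdatabyear (listx : List (List (Int × Int))) (year : Int) (out : Int × Int × Int) : Prop := out = grabdatabyear_alt listx year
instance (listx : List (List (Int × Int))) (year : Int) (out : Int × Int × Int) : Decidable (Spec_grabdatabyear listx year out) := by unfold Spec_grabdatabyear; infer_instance

-- ===== CLAIM (what is proved, stated in full; the proofs are below) =====
def Claim_equal_grabdatabyear : Prop := ∀ (listx : List (List (Int × Int))) (year : Int), Dom_grabdatabyear listx year → Spec_grabdatabyear listx year (grabdatabyear listx year)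

-- ===== LEMMAS AND PROOFS =====

-- forward "last match wins" accumulator, the shape of A's inner loop per slot
def pvLastW (year : Int) : List (Int × Int) → Int → Int
  | [], a => a
  | p :: rest, a => pvLastW year rest (if p.1 == year then p.2 else a)

theorem pvScanFirst_append (year : Int) (xs : List (Int × Int)) (q : Int × Int) :
    pvScanFirst year (xs ++ [q]) =
      if xs.any (fun p => p.1 == year) then pvScanFirst year xs
      else if q.1 == year then q.2 else -1 := by
  induction xs with
  | nil => simp [pvScanFirst]
  | cons p rest ih =>
      cases hb : (p.1 == year)
      · simp only [List.cons_append, pvScanFirst, hb, Bool.false_eq_true, if_false, ih,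
          List.any_cons, Bool.false_or]
      · simp [pvScanFirst, hb]

theorem pvLastW_eq (year : Int) (l : List (Int × Int)) : ∀ a,
    pvLastW year l a =
      if l.any (fun p => p.1 == year) then pvScanFirst year l.reverse else a := by
  induction l with
  | nil => intro a; simp [pvLastW]
  | cons p rest ih =>
      intro a
      have : (p :: rest).reverse = rest.reverse ++ [p] := by simp
      rw [pvLastW, ih, this, pvScanFirst_append]
      by_cases hr : rest.any (fun q => q.1 == year) <;>
        by_cases hp : p.1 == year <;>
        simp [hr, hp, List.any_reverse]

theorem pvScanFirst_nomatch (year : Int) (l : List (Int × Int))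
    (h : l.any (fun p => p.1 == year) = false) : pvScanFirst year l = -1 := by
  induction l with
  | nil => rfl
  | cons p rest ih =>
      simp only [List.any_cons, Bool.or_eq_false_iff] at h
      simp [pvScanFirst, h.1, ih h.2]

theorem pvLastW_neg (year : Int) (l : List (Int × Int)) :
    pvLastW year l (-1) = pvLastValueForYear l year := by
  rw [pvLastW_eq]
  unfold pvLastValueForYear
  cases h : l.any (fun p => p.1 == year)
  · rw [if_neg Bool.false_ne_true,
      pvScanFirst_nomatch year l.reverse (by simpa [List.any_reverse] using h)]
  · rw [if_pos rfl]

-- A's inner loop for i = 0 / 1 / 2 updates exactly one slot as pvLastW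
theorem pvInner0 (year : Int) (l : List (Int × Int)) : ∀ s : Int × Int × Int,
    l.foldl (pvAStep year 0) s = (pvLastW year l s.1, s.2.1, s.2.2) := by
  induction l with
  | nil => intro s; simp [pvLastW]
  | cons p rest ih =>
      intro s
      by_cases h : p.1 == year <;> simp [pvAStep, h, ih, pvLastW]

theorem pvInner1 (year : Int) (l : List (Int × Int)) : ∀ s : Int × Int × Int,
    l.foldl (pvAStep year 1) s = (s.1, pvLastW year l s.2.1, s.2.2) := by
  induction l with
  | nil => intro s; simp [pvLastW]
  | cons p rest ih =>
      intro s
      by_cases h : p.1 == year <;> simp [pvAStep, h, ih, pvLastW]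

theorem pvInner2 (year : Int) (l : List (Int × Int)) : ∀ s : Int × Int × Int,
    l.foldl (pvAStep year 2) s = (s.1, s.2.1, pvLastW year l s.2.2) := by
  induction l with
  | nil => intro s; simp [pvLastW]
  | cons p rest ih =>
      intro s
      by_cases h : p.1 == year <;> simp [pvAStep, h, ih, pvLastW]

-- for outer index ≥ 3, A's inner loop is the identity
theorem pvInnerHigh (year : Int) (i : Nat) (hi : 3 ≤ i) (l : List (Int × Int)) :
    ∀ s : Int × Int × Int, l.foldl (pvAStep year i) s = s := by
  have h0 : (i == 0) = false := by simp; omega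
  have h1 : (i == 1) = false := by simp; omega
  have h2 : (i == 2) = false := by simp; omega
  induction l with
  | nil => intro s; simp
  | cons p rest ih =>
      intro s
      by_cases h : p.1 == year <;> simp [pvAStep, h, h0, h1, h2, ih]

theorem pvOuterHigh (listx : List (List (Int × Int))) (year : Int) (k : Nat) :
    ∀ (m : Nat), 3 ≤ m → ∀ s : Int × Int × Int,
      (List.range' m k).foldl (fun s i => (listx.getD i []).foldl (pvAStep year i) s) s = s := by
  induction k with
  | zero => intro m _ s; simp
  | succ k ih =>
      intro m hm s
      rw [List.range'_succ, List.foldl_cons, pvInnerHigh year m hm]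
      exact ih (m + 1) (by omega) s

theorem grabdatabyear_spec : Claim_equal_grabdatabyear := by
  unfold Claim_equal_grabdatabyear
  intro listx year _
  unfold Spec_grabdatabyear
  match listx with
  | [] => rfl
  | [l0] =>
      simp [grabdatabyear, grabdatabyear_alt, List.range_succ, pvInner0, pvLastW_neg]
  | [l0, l1] =>
      simp [grabdatabyear, grabdatabyear_alt, List.range_succ, pvInner0, pvInner1, pvLastW_neg]
  | l0 :: l1 :: l2 :: rest =>
      have hlen : (l0 :: l1 :: l2 :: rest).length = rest.length + 3 := by simp
      unfold grabdatabyear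
      rw [hlen]
      have hsplit : List.range (rest.length + 3) = [0, 1, 2] ++ List.range' 3 rest.length := by
        rw [List.range_eq_range', show rest.length + 3 = 3 + rest.length by omega,
          ← List.range'_append]
        simp [List.range']
      rw [hsplit, List.foldl_append]
      simp only [List.foldl_cons, List.foldl_nil]
      rw [pvOuterHigh (l0 :: l1 :: l2 :: rest) year rest.length 3 (by omega)]
      simp [grabdatabyear_alt, pvInner0, pvInner1, pvInner2, pvLastW_neg]
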